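-- pv_equiv track=rewrite | github.com/fore0919/Algorithm | programmers/lv.1/모의고사.py | solution
-- ===== SOURCE A (Python) =====
-- def solution(answers):
--     supo1 = [1, 2, 3, 4, 5]
--     supo2 = [2, 1, 2, 3, 2, 4, 2, 5]
--     supo3 = [3, 3, 1, 1, 2, 2, 4, 4, 5, 5]
--
--     score = [0, 0, 0]
--     answer = []
--
--     for i in range(len(answers)):
--         if answers[i] == supo1[i % 5]:
--             score[0] += 1
--         if answers[i] == supo2[i % 8]:
--             score[1] += 1
--         if answers[i] == supo3[i % 10]:
--             score[2] += 1
--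
--     winner = max(score)
--
--     for i in range(3):
--         if winner == score[i]:
--             answer.append(i + 1)
--
--     return answer
-- ===== SOURCE B (Python) =====
-- def cyclecount(answers, pat):
--     # score against a cyclically repeated answer key, one pattern-sized block at a time
--     s = 0
--     k = len(pat)
--     i = 0
--     while i < len(answers):
--         s += sum(a == b for a, b in zip(answers[i:i + k], pat))
--         i += k
--     return s
--
--
-- def solution(answers):
--     patterns = [[1, 2, 3, 4, 5],
--                 [2, 1, 2, 3, 2, 4, 2, 5],
--                 [3, 3, 1, 1, 2, 2, 4, 4, 5, 5]]
--     scores = [cyclecount(answers, p) for p in patterns]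
--     best = max(scores)
--     return [i + 1 for i, s in enumerate(scores) if s == best]
-- ===== Notes on version B (the rewrite author's own statement) =====
-- stated objective: alternative
-- what changed: B replaces A's single indexed pass with three simultaneous counters and i % 5 / i % 8 / i % 10 lookups by a helper that scores each key via an index-advancing while loop over pattern-sized slices zip-compared against the key; no modular indexing or per-element index loop remains.
import Mathlib
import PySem

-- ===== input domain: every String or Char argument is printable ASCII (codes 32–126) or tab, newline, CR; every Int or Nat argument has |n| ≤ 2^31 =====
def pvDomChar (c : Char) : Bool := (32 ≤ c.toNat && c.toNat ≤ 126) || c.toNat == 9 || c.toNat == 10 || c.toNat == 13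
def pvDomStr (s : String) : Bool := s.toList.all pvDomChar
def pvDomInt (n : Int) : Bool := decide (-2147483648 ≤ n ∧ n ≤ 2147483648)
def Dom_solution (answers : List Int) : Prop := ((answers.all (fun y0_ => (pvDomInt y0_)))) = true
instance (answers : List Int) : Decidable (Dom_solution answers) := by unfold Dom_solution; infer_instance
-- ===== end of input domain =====

-- B scores each pattern by chunking the answers into pattern-sized blocks and zip-comparing
-- each block against the key, with no per-index loop and no modular indexing (alternative decomposition).

-- ===== PORT A =====
-- Python index accesses here are always in range, so pyGetD with default 0 is exact.
def solution (answers : List Int) : List Int :=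
  let supo1 : List Int := [1, 2, 3, 4, 5]
  let supo2 : List Int := [2, 1, 2, 3, 2, 4, 2, 5]
  let supo3 : List Int := [3, 3, 1, 1, 2, 2, 4, 4, 5, 5]
  let score : Int × Int × Int :=
    (PySem.List.pyRange 0 answers.length 1).foldl
      (fun (s : Int × Int × Int) i =>
        let s1 := if PySem.List.pyGetD answers i 0 = PySem.List.pyGetD supo1 (PySem.Int.mod i 5) 0 then s.1 + 1 else s.1
        let s2 := if PySem.List.pyGetD answers i 0 = PySem.List.pyGetD supo2 (PySem.Int.mod i 8) 0 then s.2.1 + 1 else s.2.1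
        let s3 := if PySem.List.pyGetD answers i 0 = PySem.List.pyGetD supo3 (PySem.Int.mod i 10) 0 then s.2.2 + 1 else s.2.2
        (s1, s2, s3)) (0, 0, 0)
  let scoreL : List Int := [score.1, score.2.1, score.2.2]
  let winner : Int := (PySem.List.max? scoreL (fun y => y)).getD 0
  (PySem.List.pyRange 0 3 1).foldl
    (fun acc i => if winner = PySem.List.pyGetD scoreL i 0 then acc ++ [i + 1] else acc) []

-- ===== PORT B =====
-- the while-loop of cyclecount, ported as recursion on the advancing chunk start i
-- (i is a Python int that stays a nonnegative in-bounds index, ported as Nat)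
def cycleloop (answers : List Int) (q : Int) (qs : List Int) (s : Int) (i : Nat) : Int :=
  if h : i < answers.length then
    cycleloop answers q qs
      (s + ((PySem.List.slice answers (some (i : Int)) (some ((i : Int) + ((q :: qs).length : Int)))).zip (q :: qs)).foldl
            (fun t ab => t + (if ab.1 = ab.2 then 1 else 0)) 0)
      (i + (q :: qs).length)
  else s
termination_by answers.length - i
decreasing_by simp only [List.length_cons]; omega

-- the '[] => 0' branch is a totality guard only (Python's while-loop never terminates on an
-- empty pattern, since i += 0; B calls cyclecount only with the three non-empty literal patterns)
def cyclecount (answers : List Int) (pat : List Int) : Int :=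
  match pat with
  | [] => 0
  | q :: qs => cycleloop answers q qs 0 0

def pvPatterns : List (List Int) :=
  [[1, 2, 3, 4, 5], [2, 1, 2, 3, 2, 4, 2, 5], [3, 3, 1, 1, 2, 2, 4, 4, 5, 5]]

def solution_alt (answers : List Int) : List Int :=
  let scores : List Int := pvPatterns.map (fun p => cyclecount answers p)
  let best : Int := (PySem.List.max? scores (fun y => y)).getD 0
  (PySem.List.enumerate scores 0).foldl
    (fun acc is => if is.2 = best then acc ++ [is.1 + 1] else acc) []

-- ===== PRECONDITION & SPEC =====
def Spec_solution (answers : List Int) (out : List Int) : Prop := out = solution_alt answers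
instance (answers : List Int) (out : List Int) : Decidable (Spec_solution answers out) := by unfold Spec_solution; infer_instance

-- ===== CLAIM =====
def Claim_equal_solution : Prop := ∀ (answers : List Int), Dom_solution answers → Spec_solution answers (solution answers)

-- ===== LEMMAS AND PROOFS =====

-- A's per-index cyclic count, as a fold over enumerate, parametric in the start index
def pvF (pat xs : List Int) (j acc : Int) : Int :=
  (PySem.List.enumerate xs j).foldl
    (fun s ia => if ia.2 = PySem.List.pyGetD pat (PySem.Int.mod ia.1 (pat.length : Int)) 0 then s + 1 else s) acc

-- proof-side restatement of B's chunking: structural recursion on the list being consumed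
def pvCC (xs : List Int) (pat : List Int) : Int :=
  match pat with
  | [] => 0
  | q :: qs =>
    if h : xs = [] then 0
    else ((xs.zip (q :: qs)).foldl (fun s ab => s + (if ab.1 = ab.2 then 1 else 0)) 0)
         + pvCC (xs.drop (q :: qs).length) (q :: qs)
termination_by xs.length
decreasing_by
  have : 0 < xs.length := List.length_pos_iff.mpr h
  simp only [List.length_cons, List.length_drop]
  omega

theorem pvCC_nil (q : Int) (qs : List Int) : pvCC [] (q :: qs) = 0 := by
  rw [pvCC.eq_def]; simp

-- B's per-chunk zip count
def pvZC (xs p : List Int) : Int :=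
  (xs.zip p).foldl (fun s ab => s + (if ab.1 = ab.2 then 1 else 0)) 0

theorem pvF_nil (pat : List Int) (j acc : Int) : pvF pat [] j acc = acc := rfl

theorem pvF_cons (pat : List Int) (a : Int) (t : List Int) (j acc : Int) :
    pvF pat (a :: t) j acc =
      pvF pat t (j + 1)
        (if a = PySem.List.pyGetD pat (PySem.Int.mod j (pat.length : Int)) 0 then acc + 1 else acc) := by
  simp [pvF, PySem.List.enumerate_cons]

theorem pvF_acc (pat : List Int) : ∀ (xs : List Int) (j acc : Int),
    pvF pat xs j acc = acc + pvF pat xs j 0 := by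
  intro xs j acc
  simp only [pvF, PySem.List.foldl_ite_add_one]
  ring

theorem pvZC_cons (a b : Int) (t p : List Int) :
    pvZC (a :: t) (b :: p) = (if a = b then 1 else 0) + pvZC t p := by
  simp only [pvZC, List.zip_cons_cons, List.foldl_cons, zero_add]
  rw [PySem.List.foldl_add, PySem.List.foldl_add]
  ring

theorem pvF_shift (pat : List Int) (hL : 0 < pat.length) : ∀ (xs : List Int) (j acc : Int),
    pvF pat xs (j + (pat.length : Int)) acc = pvF pat xs j acc := by
  intro xs
  induction xs with
  | nil => intro j acc; simp [pvF_nil]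
  | cons a t ih =>
      intro j acc
      rw [pvF_cons, pvF_cons]
      have hLpos : (0 : Int) < (pat.length : Int) := by exact_mod_cast hL
      have hmod : PySem.Int.mod (j + (pat.length : Int)) (pat.length : Int)
          = PySem.Int.mod j (pat.length : Int) := by
        rw [PySem.Int.mod_eq_emod_of_pos hLpos, PySem.Int.mod_eq_emod_of_pos hLpos]
        have : j + (pat.length : Int) = j + (pat.length : Int) * 1 := by ring
        rw [this, Int.add_mul_emod_self_left]
      rw [hmod]
      have : j + (pat.length : Int) + 1 = (j + 1) + (pat.length : Int) := by ring
      rw [this, ih]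

theorem pvF_zip (pat : List Int) : ∀ (ys : List Int) (j : Nat),
    j + ys.length ≤ pat.length → pvF pat ys (j : Int) 0 = pvZC ys (pat.drop j) := by
  intro ys
  induction ys with
  | nil => intro j _; simp [pvF_nil, pvZC]
  | cons a t ih =>
      intro j hle
      have hj : j < pat.length := by simp at hle; omega
      rw [pvF_cons, pvF_acc]
      have hmod : PySem.Int.mod (j : Int) (pat.length : Int) = (j : Int) := by
        rw [PySem.Int.mod_natCast, Nat.mod_eq_of_lt hj]
      rw [hmod]
      have hget : PySem.List.pyGetD pat (j : Int) 0 = pat[j] := by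
        rw [PySem.List.pyGetD_natCast, List.getD_eq_getElem?_getD, List.getElem?_eq_getElem hj]
        rfl
      have hdrop : pat.drop j = pat[j] :: pat.drop (j + 1) := List.drop_eq_getElem_cons hj
      have hcast : (j : Int) + 1 = ((j + 1 : Nat) : Int) := by push_cast; ring
      rw [hget, hcast, ih (j + 1) (by simp at hle ⊢; omega), hdrop, pvZC_cons]
      split_ifs <;> ring

theorem pv_zip_take : ∀ (p xs : List Int), (xs.take p.length).zip p = xs.zip p := by
  intro p
  induction p with
  | nil => intro xs; simp
  | cons b p ih =>
      intro xs
      cases xs with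
      | nil => simp
      | cons a t => simp [ih]

theorem pvZC_take (xs p : List Int) : pvZC (xs.take p.length) p = pvZC xs p := by
  unfold pvZC; rw [pv_zip_take]

theorem pv_cc_eq (q : Int) (qs : List Int) (xs : List Int) (h : xs ≠ []) :
    pvCC xs (q :: qs) = pvZC xs (q :: qs) + pvCC (xs.drop (q :: qs).length) (q :: qs) := by
  rw [pvCC.eq_def]
  simp only [h, dite_false, pvZC]

theorem pv_main (q : Int) (qs : List Int) : ∀ (n : Nat) (xs : List Int), xs.length ≤ n →
    pvF (q :: qs) xs 0 0 = pvCC xs (q :: qs) := by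
  intro n
  induction n with
  | zero =>
      intro xs hx
      have : xs = [] := List.eq_nil_of_length_eq_zero (by omega)
      subst this; rw [pvF_nil, pvCC_nil]
  | succ n ih =>
      intro xs hx
      by_cases hnil : xs = []
      · subst hnil; rw [pvF_nil, pvCC_nil]
      · set L : Nat := (q :: qs).length with hL
        have hL1 : 0 < L := by simp [hL]
        rw [pv_cc_eq q qs xs hnil]
        by_cases hle : xs.length ≤ L
        · have hdrop : xs.drop L = [] := by
            apply List.drop_eq_nil_of_le hle
          have htake : xs.take L = xs := List.take_of_length_le hle
          rw [hdrop, pvCC_nil]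
          have := pvF_zip (q :: qs) xs 0 (by simpa using hle)
          simpa using this
        · -- split the enumerate-fold at the first chunk
          have hsplit : xs = xs.take L ++ xs.drop L := (List.take_append_drop L xs).symm
          have hlen : (xs.take L).length = L := by
            rw [List.length_take]; omega
          have happ : pvF (q :: qs) xs 0 0
              = pvF (q :: qs) (xs.drop L) ((0 : Int) + ((xs.take L).length : Int))
                  (pvF (q :: qs) (xs.take L) 0 0) := by
            unfold pvF
            conv_lhs => rw [hsplit]
            rw [PySem.List.enumerate_append, List.foldl_append]
          rw [happ, hlen, pvF_acc]
          have hshift : pvF (q :: qs) (xs.drop L) ((0 : Int) + (L : Int)) 0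
              = pvF (q :: qs) (xs.drop L) 0 0 := pvF_shift (q :: qs) hL1 (xs.drop L) 0 0
          rw [hshift]
          have hzL : (0 : Nat) + (xs.take L).length ≤ (q :: qs).length := by
            rw [hlen]; omega
          have hzip : pvF (q :: qs) (xs.take L) 0 0 = pvZC (xs.take L) (q :: qs) := by
            have := pvF_zip (q :: qs) (xs.take L) 0 hzL
            simpa using this
          have hih : pvF (q :: qs) (xs.drop L) 0 0 = pvCC (xs.drop L) (q :: qs) := by
            apply ih
            have : 0 < xs.length := List.length_pos_iff.mpr hnil
            simp only [List.length_drop]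
            omega
          have hzc : pvZC (xs.take L) (q :: qs) = pvZC xs (q :: qs) := pvZC_take xs (q :: qs)
          rw [hzip, hih, hzc]

-- B's index-advancing while loop computes the drop-based chunk recursion
theorem pv_cycleloop_eq (answers : List Int) (q : Int) (qs : List Int) :
    ∀ (n : Nat) (i : Nat) (s : Int), answers.length - i ≤ n →
      cycleloop answers q qs s i = s + pvCC (answers.drop i) (q :: qs) := by
  intro n
  induction n with
  | zero =>
      intro i s hn
      have hge : answers.length ≤ i := by omega
      rw [cycleloop]
      simp only [Nat.not_lt.mpr hge, dite_false]
      rw [List.drop_eq_nil_of_le hge, pvCC_nil]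
      ring
  | succ n ih =>
      intro i s hn
      by_cases h : i < answers.length
      · rw [cycleloop]
        simp only [h, dite_true]
        rw [ih (i + (q :: qs).length) _ (by simp only [List.length_cons]; omega)]
        have hsl : PySem.List.slice answers (some (i : Int)) (some ((i : Int) + ((q :: qs).length : Int)))
            = (answers.drop i).take (q :: qs).length := PySem.List.slice_natCast_add answers i (q :: qs).length
        have hne : answers.drop i ≠ [] := by
          intro hc
          have := congrArg List.length hc
          simp only [List.length_drop, List.length_nil] at this
          omega
        have hdd : (answers.drop i).drop (q :: qs).length = answers.drop (i + (q :: qs).length) := by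
          rw [List.drop_drop, Nat.add_comm]
        have hcc : pvCC (answers.drop i) (q :: qs)
            = pvZC (answers.drop i) (q :: qs) + pvCC (answers.drop (i + (q :: qs).length)) (q :: qs) := by
          rw [pv_cc_eq q qs (answers.drop i) hne, hdd]
        have hz2 : ((PySem.List.slice answers (some (i : Int)) (some ((i : Int) + ((q :: qs).length : Int)))).zip (q :: qs)).foldl
              (fun t ab => t + (if ab.1 = ab.2 then 1 else 0)) 0
            = pvZC (answers.drop i) (q :: qs) := by
          rw [hsl]
          exact pvZC_take (answers.drop i) (q :: qs)
        rw [hz2, hcc]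
        ring
      · rw [cycleloop]
        simp only [h, dite_false]
        rw [List.drop_eq_nil_of_le (by omega), pvCC_nil]
        ring

theorem pv_cyclecount_eq_pvCC (answers : List Int) (q : Int) (qs : List Int) :
    cyclecount answers (q :: qs) = pvCC answers (q :: qs) := by
  rw [cyclecount]
  rw [pv_cycleloop_eq answers q qs answers.length 0 0 (by omega)]
  simp

-- the single pass updating three independent counters equals three per-pattern passes
theorem pv_tri (answers : List Int) : ∀ (L : List Int) (x y z : Int),
    L.foldl (fun (s : Int × Int × Int) i =>
        (if PySem.List.pyGetD answers i 0 = PySem.List.pyGetD [1, 2, 3, 4, 5] (PySem.Int.mod i 5) 0 then s.1 + 1 else s.1,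
         if PySem.List.pyGetD answers i 0 = PySem.List.pyGetD [2, 1, 2, 3, 2, 4, 2, 5] (PySem.Int.mod i 8) 0 then s.2.1 + 1 else s.2.1,
         if PySem.List.pyGetD answers i 0 = PySem.List.pyGetD [3, 3, 1, 1, 2, 2, 4, 4, 5, 5] (PySem.Int.mod i 10) 0 then s.2.2 + 1 else s.2.2)) (x, y, z)
      = (L.foldl (fun x y => if PySem.List.pyGetD answers y 0 = PySem.List.pyGetD [1, 2, 3, 4, 5] (PySem.Int.mod y 5) 0 then x + 1 else x) x,
         L.foldl (fun x y => if PySem.List.pyGetD answers y 0 = PySem.List.pyGetD [2, 1, 2, 3, 2, 4, 2, 5] (PySem.Int.mod y 8) 0 then x + 1 else x) y,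
         L.foldl (fun x y => if PySem.List.pyGetD answers y 0 = PySem.List.pyGetD [3, 3, 1, 1, 2, 2, 4, 4, 5, 5] (PySem.Int.mod y 10) 0 then x + 1 else x) z) := by
  intro L
  induction L with
  | nil => intro x y z; rfl
  | cons a t ih =>
      intro x y z
      simp only [List.foldl_cons]
      exact ih _ _ _

-- A's per-pattern indexed loop equals B's chunked count, for each key
theorem pv_count (p0 : Int) (ps : List Int) (answers : List Int) (m : Int)
    (hm : m = ((p0 :: ps).length : Int)) :
    (PySem.List.pyRange 0 (answers.length : Int) 1).foldl
        (fun x y => if PySem.List.pyGetD answers y 0 = PySem.List.pyGetD (p0 :: ps) (PySem.Int.mod y m) 0 then x + 1 else x) 0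
      = cyclecount answers (p0 :: ps) := by
  subst hm
  have h := pv_main p0 ps answers.length answers le_rfl
  unfold pvF at h
  rw [PySem.List.enumerate_eq_map_pyRange (d := 0), List.foldl_map] at h
  simp only [PySem.List.len_eq] at h
  exact h.trans (pv_cyclecount_eq_pvCC answers p0 ps).symm

-- the two result-collecting loops agree for a 3-element score list
theorem pv_final (c1 c2 c3 w : Int) :
    List.foldl (fun (acc : List Int) i => if w = PySem.List.pyGetD [c1, c2, c3] i 0 then acc ++ [i + 1] else acc) [] (PySem.List.pyRange 0 3 1)
      = List.foldl (fun (acc : List Int) (is : Int × Int) => if is.2 = w then acc ++ [is.1 + 1] else acc) [] (PySem.List.enumerate [c1, c2, c3] 0) := by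
  simp only [show PySem.List.pyRange 0 3 1 = [0, 1, 2] from by decide,
    PySem.List.enumerate_cons, PySem.List.enumerate_nil, List.foldl_cons, List.foldl_nil]
  simp [PySem.List.pyGetD_ofNat']
  simp only [@eq_comm _ w]

theorem solution_eq_alt (answers : List Int) : solution answers = solution_alt answers := by
  unfold solution solution_alt pvPatterns
  simp only [List.map]
  rw [pv_tri answers]
  have h1 := pv_count 1 [2, 3, 4, 5] answers 5 (by norm_num)
  have h2 := pv_count 2 [1, 2, 3, 2, 4, 2, 5] answers 8 (by norm_num)
  have h3 := pv_count 3 [3, 1, 1, 2, 2, 4, 4, 5, 5] answers 10 (by norm_num)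
  rw [h1, h2, h3]
  exact pv_final _ _ _ _

-- ===== VERDICT =====
theorem solution_spec : Claim_equal_solution := by
  intro answers _
  exact solution_eq_alt answers
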